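-- pv_equiv track=rewrite | github.com/Omni-Defi-Production-System1/execution_lane- | omniarb/python/routing/multi_path_router.py | _find_paths
-- ===== SOURCE A (Python) =====
-- from typing import Dict, List, Optional, Set
--
-- def _find_paths(
--
--     start: str,
--     graph: Dict[str, Set[str]],
--     max_depth: int
-- ) -> List[List[str]]:
--     """Find all cyclic paths from start token"""
--     paths = []
--
--     def dfs(current: str, path: List[str], visited: Set[str], depth: int):
--         if depth > max_depth:
--             return
--
--         if depth >= 2 and current == start:
--             paths.append(path + [current])
--             return
--
--         if current not in graph:
--             return
--
--         for next_token in graph[current]: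
--             if next_token in visited and next_token != start:
--                 continue
--
--             new_visited = visited.copy()
--             new_visited.add(current)
--             dfs(next_token, path + [current], new_visited, depth + 1)
--
--     dfs(start, [], set(), 0)
--     return paths
-- ===== SOURCE B (Python) =====
-- def _find_paths(start, graph, max_depth):
--     """Find all cyclic paths from start token (iterative stack-based DFS)."""
--     paths = []
--     stack = [(start, [], set(), 0)]
--     while stack:
--         current, path, visited, depth = stack.pop()
--         if depth > max_depth:
--             continue
--         if depth >= 2 and current == start:
--             paths.append(path + [current])
--             continue
--         if current not in graph:
--             continue
--         new_path = path + [current]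
--         new_visited = visited | {current}
--         for next_token in reversed(list(graph[current])):
--             if next_token in visited and next_token != start:
--                 continue
--             stack.append((next_token, new_path, new_visited, depth + 1))
--     return paths
-- ===== Notes on version B (the rewrite author's own statement) =====
-- stated objective: alternative
-- what changed: Replaced the nested recursive DFS callback that appends to a closed-over list with an explicit stack-based iterative DFS (frames pushed in reversed neighbor order to preserve A's pre-order output).
import Mathlib
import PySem

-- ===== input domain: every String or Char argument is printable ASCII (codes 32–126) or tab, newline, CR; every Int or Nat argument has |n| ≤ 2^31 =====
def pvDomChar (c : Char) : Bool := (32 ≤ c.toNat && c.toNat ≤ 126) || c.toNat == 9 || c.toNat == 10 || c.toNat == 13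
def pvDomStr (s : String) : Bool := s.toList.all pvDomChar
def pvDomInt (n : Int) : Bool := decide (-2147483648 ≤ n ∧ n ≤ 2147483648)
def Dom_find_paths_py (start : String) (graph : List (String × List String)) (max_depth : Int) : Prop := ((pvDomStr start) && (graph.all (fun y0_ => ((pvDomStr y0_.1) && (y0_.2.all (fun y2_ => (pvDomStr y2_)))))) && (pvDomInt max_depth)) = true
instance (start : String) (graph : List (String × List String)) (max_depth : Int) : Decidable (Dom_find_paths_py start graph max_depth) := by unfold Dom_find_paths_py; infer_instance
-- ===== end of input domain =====

-- B rewrites A's recursive DFS as an explicit stack-based iterative DFS (alternative decomposition, same cost).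

-- ===== PORT A =====
-- A's nested recursive `dfs`; the Nat fuel argument (= max_depth.toNat + 1 - depth) is only a
-- totality device: the `depth > max_depth` guard always fires before fuel reaches 0.
def pvDfsA (start : String) (graph : List (String × List String)) (max_depth : Int) :
    Nat → String → List String → PySem.Set String → Int → List (List String)
  | 0, _, _, _, _ => []
  | fuel+1, current, path, visited, depth =>
    if depth > max_depth then []
    else if depth ≥ 2 ∧ current = start then [path ++ [current]]
    else match List.lookup current graph with
      | none => []
      | some ns => ns.flatMap (fun nt =>
          if PySem.Set.contains visited nt && nt != start then []
          else pvDfsA start graph max_depth fuel nt (path ++ [current])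
                 (PySem.Set.add visited current) (depth + 1))

def find_paths_py (start : String) (graph : List (String × List String)) (max_depth : Int) : List (List String) :=
  pvDfsA start graph max_depth (max_depth.toNat + 1) start [] PySem.Set.empty 0

-- ===== PORT B =====
-- termination bookkeeping for the stack loop: a frame of fuel f weighs (bound+1)^f
def pvBound (graph : List (String × List String)) : Nat := (graph.map (fun p => p.2.length)).sum

def pvMsr (b : Nat) (st : List (String × List String × PySem.Set String × Int × Nat)) : Nat :=
  (st.map (fun fr => (b + 1) ^ fr.2.2.2.2)).sum

theorem pvLookup_len_le (graph : List (String × List String)) (cur : String) (ns : List String)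
    (h : List.lookup cur graph = some ns) : ns.length ≤ pvBound graph := by
  induction graph with
  | nil => simp [List.lookup] at h
  | cons p rest ih =>
    obtain ⟨k, v⟩ := p
    by_cases hk : cur == k
    · simp [List.lookup, hk] at h
      subst h
      simp [pvBound]
    · simp [List.lookup, hk] at h
      have := ih h
      simp [pvBound] at this ⊢
      omega

theorem pvMsr_cons (b : Nat) (fr : String × List String × PySem.Set String × Int × Nat)
    (rest : List (String × List String × PySem.Set String × Int × Nat)) :
    pvMsr b (fr :: rest) = (b + 1) ^ fr.2.2.2.2 + pvMsr b rest := by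
  simp [pvMsr]

theorem pvMsr_lt_cons (b : Nat) (fr : String × List String × PySem.Set String × Int × Nat)
    (rest : List (String × List String × PySem.Set String × Int × Nat)) :
    pvMsr b rest < pvMsr b (fr :: rest) := by
  rw [pvMsr_cons]
  have : 0 < (b + 1) ^ fr.2.2.2.2 := Nat.pow_pos (by omega)
  omega

theorem pvMsr_map (b : Nat) (l : List String) (np : List String) (nv : PySem.Set String)
    (nd : Int) (f : Nat) :
    pvMsr b (l.map (fun nt => (nt, np, nv, nd, f))) = l.length * (b + 1) ^ f := by
  induction l with
  | nil => simp [pvMsr]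
  | cons x xs ih =>
    simp [pvMsr] at ih ⊢
    rw [ih]
    ring

theorem pvMsr_push (b : Nat) (l : List String) (np : List String) (nv : PySem.Set String)
    (nd : Int) (f : Nat)
    (rest : List (String × List String × PySem.Set String × Int × Nat))
    (hl : l.length ≤ b) :
    pvMsr b (l.map (fun nt => (nt, np, nv, nd, f)) ++ rest) < (b + 1) ^ (f + 1) + pvMsr b rest := by
  have happ : pvMsr b (l.map (fun nt => (nt, np, nv, nd, f)) ++ rest)
      = pvMsr b (l.map (fun nt => (nt, np, nv, nd, f))) + pvMsr b rest := by simp [pvMsr]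
  have hpos : 0 < (b + 1) ^ f := Nat.pow_pos (by omega)
  rw [happ, pvMsr_map, pow_succ]
  have : l.length * (b + 1) ^ f < (b + 1) ^ f * (b + 1) := by nlinarith
  omega

-- B's while-loop over an explicit stack (head = top); frames carry the same fuel device as port A.
def pvLoop (start : String) (graph : List (String × List String)) (max_depth : Int) :
    List (String × List String × PySem.Set String × Int × Nat) → List (List String) → List (List String)
  | [], acc => acc
  | (_, _, _, _, 0) :: rest, acc => pvLoop start graph max_depth rest acc
  | (cur, path, vis, depth, fuel+1) :: rest, acc =>
    if depth > max_depth then pvLoop start graph max_depth rest acc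
    else if depth ≥ 2 ∧ cur = start then pvLoop start graph max_depth rest (acc ++ [path ++ [cur]])
    else match h : List.lookup cur graph with
      | none => pvLoop start graph max_depth rest acc
      | some ns =>
        pvLoop start graph max_depth
          (((ns.filter (fun nt => !(PySem.Set.contains vis nt && nt != start))).map
             (fun nt => (nt, path ++ [cur], PySem.Set.add vis cur, depth + 1, fuel))) ++ rest) acc
  termination_by st _ => pvMsr (pvBound graph) st
  decreasing_by
  · exact pvMsr_lt_cons _ _ _
  · exact pvMsr_lt_cons _ _ _
  · exact pvMsr_lt_cons _ _ _
  · exact pvMsr_lt_cons _ _ _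
  · rw [pvMsr_cons]
    exact pvMsr_push _ _ _ _ _ _ _
      (le_trans (List.length_filter_le _ _) (pvLookup_len_le graph cur ns h))

def find_paths_py_alt (start : String) (graph : List (String × List String)) (max_depth : Int) : List (List String) :=
  pvLoop start graph max_depth [(start, [], PySem.Set.empty, 0, max_depth.toNat + 1)] []

-- ===== PRECONDITION & SPEC =====
def Spec_find_paths_py (start : String) (graph : List (String × List String)) (max_depth : Int) (out : List (List String)) : Prop := out = find_paths_py_alt start graph max_depth
instance (start : String) (graph : List (String × List String)) (max_depth : Int) (out : List (List String)) : Decidable (Spec_find_paths_py start graph max_depth out) := by unfold Spec_find_paths_py; infer_instance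

-- ===== CLAIM (what is proved, stated in full; the proofs are below) =====
def Claim_equal_find_paths_py : Prop := ∀ (start : String) (graph : List (String × List String)) (max_depth : Int), Dom_find_paths_py start graph max_depth → Spec_find_paths_py start graph max_depth (find_paths_py start graph max_depth)

-- ===== LEMMAS AND PROOFS =====

-- popping one frame off the stack produces exactly the recursive dfs's output for that frame
theorem pvLoop_cons (start : String) (graph : List (String × List String)) (max_depth : Int) :
    ∀ (fuel : Nat) (cur : String) (path : List String) (vis : PySem.Set String) (depth : Int)
      (rest : List (String × List String × PySem.Set String × Int × Nat)) (acc : List (List String)),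
      pvLoop start graph max_depth ((cur, path, vis, depth, fuel) :: rest) acc
        = pvLoop start graph max_depth rest (acc ++ pvDfsA start graph max_depth fuel cur path vis depth) := by
  intro fuel
  induction fuel with
  | zero => intro cur path vis depth rest acc; simp [pvLoop, pvDfsA]
  | succ f ih =>
    intro cur path vis depth rest acc
    rw [pvLoop, pvDfsA]
    by_cases h1 : depth > max_depth
    · simp [h1]
    · simp only [if_neg h1]
      by_cases h2 : depth ≥ 2 ∧ cur = start
      · simp [h2]
      · simp only [if_neg h2]
        cases h : List.lookup cur graph with
        | none => simp
        | some ns =>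
          simp only []
          have aux : ∀ (l : List String) (rest' : List (String × List String × PySem.Set String × Int × Nat))
              (acc' : List (List String)),
              pvLoop start graph max_depth
                (((l.filter (fun nt => !(PySem.Set.contains vis nt && nt != start))).map
                   (fun nt => (nt, path ++ [cur], PySem.Set.add vis cur, depth + 1, f))) ++ rest') acc'
                = pvLoop start graph max_depth rest'
                    (acc' ++ l.flatMap (fun nt =>
                      if PySem.Set.contains vis nt && nt != start then []
                      else pvDfsA start graph max_depth f nt (path ++ [cur])
                             (PySem.Set.add vis cur) (depth + 1))) := by
            intro l
            induction l with
            | nil => intro rest' acc'; simp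
            | cons nt l' ihl =>
              intro rest' acc'
              by_cases hb : (PySem.Set.contains vis nt && nt != start) = true
              · have hf : List.filter (fun nt => !(PySem.Set.contains vis nt && nt != start)) (nt :: l')
                    = List.filter (fun nt => !(PySem.Set.contains vis nt && nt != start)) l' := by
                  rw [List.filter_cons, hb]
                  simp
                rw [hf, ihl, List.flatMap_cons, if_pos hb, List.nil_append]
              · have hbf : (PySem.Set.contains vis nt && nt != start) = false := by
                  simpa using hb
                have hf : List.filter (fun nt => !(PySem.Set.contains vis nt && nt != start)) (nt :: l')
                    = nt :: List.filter (fun nt => !(PySem.Set.contains vis nt && nt != start)) l' := by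
                  rw [List.filter_cons, hbf]
                  simp
                rw [hf, List.map_cons, List.cons_append, ih, ihl, List.flatMap_cons]
                rw [hbf]
                simp [List.append_assoc]
          exact aux ns rest acc

-- ===== VERDICT (by name: the statement is the Claim_ definition above) =====
theorem find_paths_py_spec : Claim_equal_find_paths_py := by
  intro start graph max_depth _
  unfold Spec_find_paths_py find_paths_py find_paths_py_alt
  rw [pvLoop_cons]
  simp [pvLoop]
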